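-- pv_equiv track=rewrite | github.com/tomernadiv/vertex_model | neuron_initiation.py | get_all_frame_bounds
-- ===== SOURCE A (Python) =====
-- def get_frame_bounds_from_index(frame_index: int, num_cols: int, num_frames: int):
--     frame_width = num_cols // num_frames
--     frame_start = frame_index * frame_width
--     frame_end = (frame_index + 1) * frame_width if frame_index < num_frames - 1 else num_cols
--     return frame_start, frame_end
--
-- def get_all_frame_bounds(num_frames: int, num_cols: int, num_rows: int, num_layers: int = 0):
--     frame_bounds = []
--     for frame_index in range(num_frames):
--         x_start, x_end = get_frame_bounds_from_index(frame_index, num_cols, num_frames)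
--         inner_left = x_start + num_layers - 1
--         inner_right = x_end - num_layers
--         inner_top = num_layers - 1
--         inner_bottom = num_rows - num_layers
--         frame_bounds.append((inner_left, inner_right, inner_top, inner_bottom))
--     return frame_bounds
-- ===== SOURCE B (Python) =====
-- def get_all_frame_bounds(num_frames: int, num_cols: int, num_rows: int, num_layers: int = 0):
--     if num_frames <= 0:
--         return []
--     frame_width = num_cols // num_frames
--     inner_top = num_layers - 1
--     inner_bottom = num_rows - num_layers
--     # preallocate the output, then fill it back-to-front, carrying each frame's
--     # left edge as the previous frame's right edge (num_cols is the initial edge)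
--     frames = [(0, 0, 0, 0)] * num_frames
--     right_edge = num_cols
--     for k in range(num_frames, 0, -1):
--         left = (k - 1) * frame_width
--         frames[k - 1] = (left + num_layers - 1, right_edge - num_layers,
--                          inner_top, inner_bottom)
--         right_edge = left
--     return frames
-- ===== Notes on version B (the rewrite author's own statement) =====
-- stated objective: alternative
-- what changed: B preallocates the output list and fills it back-to-front by a countdown loop that threads each frame's left edge as the previous frame's carried right edge, so A's per-index helper call and its last-frame conditional disappear (num_cols is just the initial carried edge); A instead scans forward, recomputing start/end per index with a branch and appending.
import Mathlib
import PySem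

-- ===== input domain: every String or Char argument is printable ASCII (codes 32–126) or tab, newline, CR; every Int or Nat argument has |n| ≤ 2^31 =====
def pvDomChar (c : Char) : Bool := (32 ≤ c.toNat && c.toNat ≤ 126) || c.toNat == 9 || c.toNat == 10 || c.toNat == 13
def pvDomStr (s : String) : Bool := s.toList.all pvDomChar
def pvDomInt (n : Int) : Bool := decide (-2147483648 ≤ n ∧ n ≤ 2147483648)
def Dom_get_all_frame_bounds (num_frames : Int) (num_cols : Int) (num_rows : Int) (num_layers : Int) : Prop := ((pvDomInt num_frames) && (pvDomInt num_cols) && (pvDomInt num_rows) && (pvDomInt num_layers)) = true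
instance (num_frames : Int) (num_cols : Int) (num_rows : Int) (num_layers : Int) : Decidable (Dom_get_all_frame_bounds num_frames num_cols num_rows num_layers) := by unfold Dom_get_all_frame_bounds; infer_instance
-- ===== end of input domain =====

-- B preallocates the output and fills it back-to-front, threading each frame's left edge
-- as the previous frame's right edge, which removes A's last-frame branch;
-- objective: alternative decomposition, same O(n) cost.

-- ===== PORT A =====
def get_frame_bounds_from_index (frame_index : Int) (num_cols : Int) (num_frames : Int) : Int × Int :=
  let frame_width := PySem.Int.floordiv num_cols num_frames
  let frame_start := frame_index * frame_width
  let frame_end := if frame_index < num_frames - 1 then (frame_index + 1) * frame_width else num_cols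
  (frame_start, frame_end)

def get_all_frame_bounds (num_frames : Int) (num_cols : Int) (num_rows : Int) (num_layers : Int) : List (Int × Int × Int × Int) :=
  (PySem.List.pyRange 0 num_frames 1).foldl (fun frame_bounds frame_index =>
    let (x_start, x_end) := get_frame_bounds_from_index frame_index num_cols num_frames
    let inner_left := x_start + num_layers - 1
    let inner_right := x_end - num_layers
    let inner_top := num_layers - 1
    let inner_bottom := num_rows - num_layers
    frame_bounds ++ [(inner_left, inner_right, inner_top, inner_bottom)]) []

-- ===== PORT B =====
def get_all_frame_bounds_alt (num_frames : Int) (num_cols : Int) (num_rows : Int) (num_layers : Int) : List (Int × Int × Int × Int) :=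
  if num_frames ≤ 0 then []
  else
    let frame_width := PySem.Int.floordiv num_cols num_frames
    let inner_top := num_layers - 1
    let inner_bottom := num_rows - num_layers
    -- frames = [(0,0,0,0)] * num_frames  (num_frames > 0 here, so toNat is exact)
    let frames := List.replicate num_frames.toNat ((0 : Int), (0 : Int), (0 : Int), (0 : Int))
    -- for k in range(num_frames, 0, -1): frames[k-1] = …; right_edge = left
    let st := (PySem.List.pyRange num_frames 0 (-1)).foldl
      (fun (st : List (Int × Int × Int × Int) × Int) k =>
        let left := (k - 1) * frame_width
        (PySem.List.pySetD st.1 (k - 1)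
          (left + num_layers - 1, st.2 - num_layers, inner_top, inner_bottom), left))
      (frames, num_cols)
    st.1

-- ===== PRECONDITION & SPEC =====
def Spec_get_all_frame_bounds (num_frames : Int) (num_cols : Int) (num_rows : Int) (num_layers : Int) (out : List (Int × Int × Int × Int)) : Prop := out = get_all_frame_bounds_alt num_frames num_cols num_rows num_layers
instance (num_frames : Int) (num_cols : Int) (num_rows : Int) (num_layers : Int) (out : List (Int × Int × Int × Int)) : Decidable (Spec_get_all_frame_bounds num_frames num_cols num_rows num_layers out) := by unfold Spec_get_all_frame_bounds; infer_instance

-- ===== CLAIM =====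
def Claim_equal_get_all_frame_bounds : Prop := ∀ (num_frames : Int) (num_cols : Int) (num_rows : Int) (num_layers : Int), Dom_get_all_frame_bounds num_frames num_cols num_rows num_layers → Spec_get_all_frame_bounds num_frames num_cols num_rows num_layers (get_all_frame_bounds num_frames num_cols num_rows num_layers)

-- ===== LEMMAS AND PROOFS =====

-- A's loop as a map over the index range, with the helper inlined
theorem getAFB_eq_map (num_frames num_cols num_rows num_layers : Int) :
    get_all_frame_bounds num_frames num_cols num_rows num_layers =
      (PySem.List.pyRange 0 num_frames 1).map (fun i =>
        (i * PySem.Int.floordiv num_cols num_frames + num_layers - 1,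
         (if i < num_frames - 1 then (i + 1) * PySem.Int.floordiv num_cols num_frames else num_cols) - num_layers,
         num_layers - 1, num_rows - num_layers)) := by
  unfold get_all_frame_bounds
  rw [PySem.List.foldl_append_singleton_eq_map]
  simp [get_frame_bounds_from_index]

-- characterisation of B's countdown fill: after the counter has run from m down to 1,
-- slots 0..m-1 hold the frames (slot m-1 closed by the carried edge), the rest is untouched
theorem fill_eq (w nl top bot : Int) (m : Nat) (right : Int)
    (xs : List (Int × Int × Int × Int)) (h : m ≤ xs.length) :
    ((PySem.List.pyRange (m : Int) 0 (-1)).foldl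
      (fun (st : List (Int × Int × Int × Int) × Int) k =>
        let left := (k - 1) * w
        (PySem.List.pySetD st.1 (k - 1)
          (left + nl - 1, st.2 - nl, top, bot), left))
      (xs, right)).1
    = (List.range m).map (fun (i : Nat) =>
        ((i : Int) * w + nl - 1,
         (if i = m - 1 then right else ((i : Int) + 1) * w) - nl, top, bot)) ++ xs.drop m := by
  induction m generalizing right xs with
  | zero =>
    simp [PySem.List.pyRange_neg_one_eq_nil (by omega : (0 : Int) ≤ 0)]
  | succ m ih =>
    rw [show ((m + 1 : Nat) : Int) = (m : Nat) + 1 by push_cast; ring]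
    rw [PySem.List.pyRange_neg_one_cons (by omega : (0 : Int) < (m : Nat) + 1), List.foldl_cons]
    simp only []
    have hidx : ((m : Nat) + 1 - 1 : Int) = ((m : Nat) : Int) := by ring
    rw [hidx, PySem.List.pySetD_natCast]
    have hm : m < xs.length := by omega
    rw [ih _ _ (by simp; omega)]
    have hdrop : (xs.set m ((m : Int) * w + nl - 1, right - nl, top, bot)).drop m
        = ((m : Int) * w + nl - 1, right - nl, top, bot) :: xs.drop (m + 1) := by
      rw [List.drop_set, if_neg (by omega : ¬ m < m), Nat.sub_self,
        List.drop_eq_getElem_cons hm, List.set_cons_zero]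
    rw [hdrop]
    have hmap : (List.range m).map (fun (i : Nat) =>
          ((i : Int) * w + nl - 1,
           (if i = m - 1 then (m : Int) * w else ((i : Int) + 1) * w) - nl, top, bot))
        = (List.range m).map (fun (i : Nat) =>
          ((i : Int) * w + nl - 1,
           (if i = (m + 1) - 1 then right else ((i : Int) + 1) * w) - nl, top, bot)) := by
      apply List.map_congr_left
      intro i hi
      have hik : i < m := List.mem_range.mp hi
      by_cases hq : i = m - 1
      · rw [if_pos hq, if_neg (by omega : ¬ i = (m + 1) - 1)]
        have h2 : ((i : Int) + 1) = (m : Int) := by omega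
        rw [h2]
      · rw [if_neg hq, if_neg (by omega : ¬ i = (m + 1) - 1)]
    rw [hmap, List.range_succ, List.map_append]
    simp

-- ===== VERDICT =====
theorem get_all_frame_bounds_spec : Claim_equal_get_all_frame_bounds := by
  intro nf nc nr nl _
  unfold Spec_get_all_frame_bounds get_all_frame_bounds_alt
  rw [getAFB_eq_map]
  by_cases h : nf ≤ 0
  · simp [h, PySem.List.pyRange_one_eq_nil (by omega : nf ≤ 0)]
  · rw [if_neg h]
    show _ = ((PySem.List.pyRange nf 0 (-1)).foldl
      (fun (st : List (Int × Int × Int × Int) × Int) k =>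
        let left := (k - 1) * PySem.Int.floordiv nc nf
        (PySem.List.pySetD st.1 (k - 1)
          (left + nl - 1, st.2 - nl, nl - 1, nr - nl), left))
      (List.replicate nf.toNat ((0 : Int), (0 : Int), (0 : Int), (0 : Int)), nc)).1
    rw [show PySem.List.pyRange nf 0 (-1)
        = PySem.List.pyRange ((nf.toNat : Nat) : Int) 0 (-1) by
      rw [Int.toNat_of_nonneg (by omega)]]
    rw [fill_eq _ _ _ _ nf.toNat nc _ (by simp)]
    rw [List.drop_eq_nil_of_le (by simp), List.append_nil,
      PySem.List.pyRange_one, List.map_map]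
    simp only [Int.sub_zero]
    apply List.map_congr_left
    intro i hi
    have hik : i < nf.toNat := List.mem_range.mp hi
    simp only [Function.comp]
    by_cases hl : (0 : Int) + (i : Int) < nf - 1
    · have hne : ¬ i = nf.toNat - 1 := by omega
      rw [if_pos hl, if_neg hne]
      simp
    · have heq : i = nf.toNat - 1 := by omega
      rw [if_neg hl, if_pos heq]
      simp
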